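-- pv_equiv track=rewrite | github.com/Palamabron/WordleSolver | gui.py | wordToStateList
-- ===== SOURCE A (Python) =====
-- def wordToStateList(word, result):
--     misplaced = []
--     correct = []
--     wrongs = ""
--     for i in range(len(result)):
--         if result[i] == 'c':
--             correct.append(word[i])
--         else:
--             correct.append('_')
--
--     for i in range(len(result)):
--         if result[i] == 'm':
--             misplaced.append(word[i])
--         else:
--             misplaced.append('_')
--
--     for i in range(len(result)):
--         if result[i] == 'w':
--             wrongs += word[i]
--
--     return correct, misplaced, wrongs
-- ===== SOURCE B (Python) =====
-- def wordToStateList(word, result):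
--     correct = []
--     misplaced = []
--     wrongs = ""
--     for r, ch in zip(result, word):
--         correct.append(ch if r == 'c' else '_')
--         misplaced.append(ch if r == 'm' else '_')
--         if r == 'w':
--             wrongs += ch
--     return correct, misplaced, wrongs
-- ===== Notes on version B (the rewrite author's own statement) =====
-- stated objective: simpler
-- what changed: Replaces A's three separate index-based scans of range(len(result)) with a single pass over zip(result, word) that builds correct, misplaced and wrongs simultaneously without any indexing; Pre_ excludes inputs with result longer than word (outside the word/result contract), where A raises IndexError on an out-of-range code or '_'-pads from codes beyond the word while B's zip truncates — both behaviours are accidental there.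
-- outside the precondition, e.g. on wordToStateList('', 'y9y'): A returns (['_', '_', '_'], ['_', '_', '_'], ''), B returns ([], [], ''); on wordToStateList('a', 'cm'): A raises IndexError, B returns (['a'], ['_'], '')
import Mathlib
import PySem

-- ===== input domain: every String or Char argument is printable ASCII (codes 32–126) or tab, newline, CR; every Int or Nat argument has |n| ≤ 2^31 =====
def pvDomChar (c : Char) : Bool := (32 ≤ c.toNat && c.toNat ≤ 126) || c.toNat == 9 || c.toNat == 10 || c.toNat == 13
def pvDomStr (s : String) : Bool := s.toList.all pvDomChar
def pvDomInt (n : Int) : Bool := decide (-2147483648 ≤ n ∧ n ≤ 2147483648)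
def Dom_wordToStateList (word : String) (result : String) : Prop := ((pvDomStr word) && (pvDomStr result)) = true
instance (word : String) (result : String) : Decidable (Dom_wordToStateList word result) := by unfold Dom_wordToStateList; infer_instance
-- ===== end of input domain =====

-- B replaces A's three separate index-based scans with one pass over zip(result, word); objective: simpler (one pass, no indexing).

-- ===== PORT A =====
-- A: three loops over range(len(result)), each indexing result[i] and word[i].
-- word[i] can raise IndexError; under Pre_ every index is in range, so getD's default is never hit.
def wordToStateList (word : String) (result : String) : List String × List String × String :=
  let w := word.toList
  let r := result.toList
  let correct := (List.range r.length).foldl (fun acc i =>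
      acc ++ [if r.getD i ' ' = 'c' then String.ofList [w.getD i ' '] else "_"]) []
  let misplaced := (List.range r.length).foldl (fun acc i =>
      acc ++ [if r.getD i ' ' = 'm' then String.ofList [w.getD i ' '] else "_"]) []
  let wrongs := (List.range r.length).foldl (fun acc i =>
      if r.getD i ' ' = 'w' then acc ++ String.ofList [w.getD i ' '] else acc) ""
  (correct, misplaced, wrongs)

-- ===== PORT B =====
-- B: one fold over zip(result, word) building all three accumulators at once.
def wordToStateList_alt (word : String) (result : String) : List String × List String × String :=
  (result.toList.zip word.toList).foldl
    (fun acc p =>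
      let correct := acc.1 ++ [if p.1 = 'c' then String.ofList [p.2] else "_"]
      let misplaced := acc.2.1 ++ [if p.1 = 'm' then String.ofList [p.2] else "_"]
      let wrongs := if p.1 = 'w' then acc.2.2 ++ String.ofList [p.2] else acc.2.2
      (correct, misplaced, wrongs))
    ([], [], "")

-- ===== PRECONDITION & SPEC =====
-- Pre_ excludes inputs with result longer than word (outside the word/result contract): there A
-- raises IndexError when an out-of-range position carries a 'c'/'m'/'w' code, and otherwise
-- '_'-pads past the end of word, while B's zip truncates — both behaviours are accidental.
def Pre_wordToStateList (word : String) (result : String) : Prop :=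
  result.toList.length ≤ word.toList.length
instance (word : String) (result : String) : Decidable (Pre_wordToStateList word result) := by
  unfold Pre_wordToStateList; infer_instance

def pvWitness_wordToStateList : String × String := ("crane", "cmwxc")

def Spec_wordToStateList (word : String) (result : String) (out : List String × List String × String) : Prop := out = wordToStateList_alt word result
instance (word : String) (result : String) (out : List String × List String × String) : Decidable (Spec_wordToStateList word result out) := by unfold Spec_wordToStateList; infer_instance

-- ===== CLAIM (what is proved, stated in full; the proofs are below) =====
def Claim_equal_wordToStateList : Prop := ∀ (word : String) (result : String), Dom_wordToStateList word result → Pre_wordToStateList word result → Spec_wordToStateList word result (wordToStateList word result)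


-- ===== LEMMAS AND PROOFS =====

-- cons through ofList splits into an append
theorem pv_ofList_cons (x : Char) (l : List Char) :
    String.ofList (x :: l) = String.ofList [x] ++ String.ofList l := by
  rw [← String.ofList_append]; rfl

-- appending-singleton foldl is a map
theorem pv_foldl_append_map {α β : Type} (l : List α) (g : α → β) (acc : List β) :
    l.foldl (fun acc x => acc ++ [g x]) acc = acc ++ l.map g := by
  induction l generalizing acc with
  | nil => simp
  | cons a t ih => simp [List.foldl, ih]

-- conditional string-append foldl collects the filtered chars
theorem pv_foldl_if_str {α : Type} (l : List α) (p : α → Prop) [DecidablePred p]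
    (f : α → Char) (s : String) :
    l.foldl (fun s x => if p x then s ++ String.ofList [f x] else s) s
      = s ++ String.ofList ((l.filter (fun x => decide (p x))).map f) := by
  induction l generalizing s with
  | nil => simp [String.ofList_nil, String.append_empty]
  | cons a t ih =>
    by_cases h : p a
    · rw [List.foldl_cons, if_pos h, ih,
        show List.filter (fun x => decide (p x)) (a :: t)
            = a :: List.filter (fun x => decide (p x)) t from by simp [h],
        List.map_cons, String.append_assoc, ← pv_ofList_cons]
    · simp [List.foldl, h, ih]

-- index map over range = map over zip, when the index functions match
theorem pv_range_map_zip {β : Type} (h : Char → Char → β) :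
    ∀ (r w : List Char), r.length ≤ w.length →
    (List.range r.length).map (fun i => h (r.getD i ' ') (w.getD i ' '))
      = (r.zip w).map (fun p => h p.1 p.2) := by
  intro r
  induction r with
  | nil => intro w _; simp
  | cons a t ih =>
    intro w hle
    cases w with
    | nil => simp at hle
    | cons b tw =>
      simp only [List.length_cons, List.range_succ_eq_map, List.map_cons, List.map_map,
        List.zip_cons_cons]
      congr 1
      have := ih tw (by simpa using hle)
      simpa [Function.comp, List.getD_cons_succ] using this

-- filter-then-map as a flatten of per-element lists
theorem pv_filter_map_eq {α β : Type} (l : List α) (p : α → Prop) [DecidablePred p] (f : α → β) :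
    (l.filter (fun x => decide (p x))).map f
      = (l.map (fun x => if p x then [f x] else [])).flatten := by
  induction l with
  | nil => simp
  | cons a t ih => by_cases h : p a <;> simp [h, ih]

-- B's single fold decomposed into its three components
theorem pv_alt_fold (l : List (Char × Char)) :
    ∀ (c m : List String) (s : String),
    l.foldl (fun acc p =>
      let correct := acc.1 ++ [if p.1 = 'c' then String.ofList [p.2] else "_"]
      let misplaced := acc.2.1 ++ [if p.1 = 'm' then String.ofList [p.2] else "_"]
      let wrongs := if p.1 = 'w' then acc.2.2 ++ String.ofList [p.2] else acc.2.2
      (correct, misplaced, wrongs)) (c, m, s)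
    = (c ++ l.map (fun p => if p.1 = 'c' then String.ofList [p.2] else "_"),
       m ++ l.map (fun p => if p.1 = 'm' then String.ofList [p.2] else "_"),
       s ++ String.ofList ((l.filter (fun p => decide (p.1 = 'w'))).map Prod.snd)) := by
  induction l with
  | nil => intro c m s; simp [String.ofList_nil, String.append_empty]
  | cons a t ih =>
    intro c m s
    by_cases h : a.1 = 'w'
    · rw [List.foldl_cons]
      dsimp only
      rw [if_pos h, ih,
        show List.filter (fun p => decide (p.1 = 'w')) (a :: t)
            = a :: List.filter (fun p => decide (p.1 = 'w')) t from by simp [h],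
        List.map_cons]
      simp [String.append_assoc, List.append_assoc, ← pv_ofList_cons]
    · rw [List.foldl_cons]
      dsimp only
      rw [if_neg h, ih,
        show List.filter (fun p => decide (p.1 = 'w')) (a :: t)
            = List.filter (fun p => decide (p.1 = 'w')) t from by simp [h]]
      simp [List.append_assoc]

theorem pv_eq_on_pre (word result : String) (hle : result.toList.length ≤ word.toList.length) :
    wordToStateList word result = wordToStateList_alt word result := by
  unfold wordToStateList wordToStateList_alt
  rw [pv_alt_fold]
  dsimp only
  refine Prod.ext ?_ (Prod.ext ?_ ?_) <;> dsimp only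
  · rw [pv_foldl_append_map,
      pv_range_map_zip (fun rc wc => if rc = 'c' then String.ofList [wc] else "_") _ _ hle]
  · rw [pv_foldl_append_map,
      pv_range_map_zip (fun rc wc => if rc = 'm' then String.ofList [wc] else "_") _ _ hle]
  · rw [pv_foldl_if_str (List.range result.toList.length)
        (fun i => result.toList.getD i ' ' = 'w') (fun i => word.toList.getD i ' ') ""]
    have h1 := pv_filter_map_eq (List.range result.toList.length)
      (fun i => result.toList.getD i ' ' = 'w') (fun i => word.toList.getD i ' ')
    have h2 := pv_filter_map_eq (result.toList.zip word.toList)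
      (fun p => p.1 = 'w') (Prod.snd)
    have h3 := pv_range_map_zip
      (fun rc wc => if rc = 'w' then [wc] else ([] : List Char)) _ _ hle
    have hlist : ((List.range result.toList.length).filter
        (fun i => decide (result.toList.getD i ' ' = 'w'))).map (fun i => word.toList.getD i ' ')
        = ((result.toList.zip word.toList).filter (fun p => decide (p.1 = 'w'))).map Prod.snd := by
      rw [h1, h2, h3]
    rw [hlist]

-- ===== VERDICT (by name: the statement is the Claim_ definition above) =====
theorem wordToStateList_spec : Claim_equal_wordToStateList := by
  intro word result _ hpre
  unfold Spec_wordToStateList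
  exact pv_eq_on_pre word result hpre
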